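-- pv_equiv track=rewrite | github.com/tomster12/coding | Multi/Eyes/Crypto/Crypto/locallib/crypto.py | encode_caeser_progressive_word
-- ===== SOURCE A (Python) =====
-- def encode_caeser_progressive_word(pt, a, shift=3, increment=1, seperator=" "):
--     pt, a = list(pt), list(a)
--     ct = []
--     for l in pt:
--         if l == seperator:
--             shift += 1
--             ct.append(seperator)
--         else:
--             ct.append(a[(a.index(l) + shift) % len(a)])
--     return "".join(ct) if isinstance(pt[0], str) else ct
-- ===== SOURCE B (Python) =====
-- def encode_caeser_progressive_word(pt, a, shift=3, increment=1, seperator=" "):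
--     # Split pt into tokens (keeping empty ones), then encode token j with shift+j.
--     tokens = [[]]
--     for c in pt:
--         if c == seperator:
--             tokens.append([])
--         else:
--             tokens[-1].append(c)
--     n = len(a)
--     words = ["".join(a[(a.index(c) + shift + j) % n] for c in word)
--              for j, word in enumerate(tokens)]
--     return seperator.join(words)
-- ===== Notes on version B (the rewrite author's own statement) =====
-- stated objective: alternative
-- what changed: A's single stateful character loop (mutating shift whenever it meets the separator) is replaced by a split-into-tokens pass followed by encoding token j with shift+j and joining the tokens with the separator.
-- crash fix: On empty pt, A raises IndexError (it accesses pt[0] for its return-type check); B naturally returns the empty string. — e.g. on encode_caeser_progressive_word("", "ab", 3, 1, " "): A raises IndexError, B returns ""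
import Mathlib
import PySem

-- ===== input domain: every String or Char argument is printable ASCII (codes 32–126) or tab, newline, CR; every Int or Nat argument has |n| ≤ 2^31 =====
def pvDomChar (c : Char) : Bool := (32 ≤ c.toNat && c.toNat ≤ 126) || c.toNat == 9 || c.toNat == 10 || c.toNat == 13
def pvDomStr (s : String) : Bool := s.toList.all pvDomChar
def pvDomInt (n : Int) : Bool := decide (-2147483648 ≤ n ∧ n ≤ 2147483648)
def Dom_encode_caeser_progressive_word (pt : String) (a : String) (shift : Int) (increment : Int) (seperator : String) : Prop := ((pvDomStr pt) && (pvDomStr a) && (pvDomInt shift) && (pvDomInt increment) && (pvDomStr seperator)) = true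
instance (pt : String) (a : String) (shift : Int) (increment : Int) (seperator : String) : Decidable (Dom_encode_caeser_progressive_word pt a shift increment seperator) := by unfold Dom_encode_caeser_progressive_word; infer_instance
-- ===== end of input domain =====

-- B replaces A's single stateful char-loop (shift mutated on separators) by a split-into-tokens
-- pass followed by a per-word encode with shift+j, joined with the separator (objective: alternative).
-- `increment` is unused by A and stays unused in B.

-- ===== PORT A =====
-- a[(a.index(l) + shift) % len(a)]; the `none` fallbacks are unreachable under Pre_ (Python raises there).
def pvAEnc (aL : List Char) (shift : Int) (c : Char) : Char :=
  match PySem.List.index? aL c with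
  | some i => (PySem.List.pyGet? aL (PySem.Int.mod ((i : Int) + shift) (aL.length : Int))).getD c
  | none => c

def pvALoop (aL : List Char) (sep : String) : List Char → Int → List Char
  | [], _ => []
  | c :: rest, shift =>
    if String.mk [c] == sep then sep.toList ++ pvALoop aL sep rest (shift + 1)
    else pvAEnc aL shift c :: pvALoop aL sep rest shift

def encode_caeser_progressive_word (pt : String) (a : String) (shift : Int) (increment : Int) (seperator : String) : String :=
  String.mk (pvALoop a.toList seperator pt.toList shift)

-- ===== PORT B =====
def pvBEnc (aL : List Char) (s : Int) (c : Char) : Char :=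
  match PySem.List.index? aL c with
  | some i => (PySem.List.pyGet? aL (PySem.Int.mod ((i : Int) + s) (aL.length : Int))).getD c
  | none => c

-- split pt on the separator, keeping empty tokens (the forward append-to-last loop of Source B)
def pvBSplit (sep : String) : List Char → List (List Char)
  | [] => [[]]
  | c :: rest =>
    if String.mk [c] == sep then [] :: pvBSplit sep rest
    else
      match pvBSplit sep rest with
      | [] => [[c]]          -- unreachable: pvBSplit is never []
      | w :: ws => (c :: w) :: ws

-- the enumerate comprehension: token j is encoded with shift + j
def pvBWords (aL : List Char) (shift : Int) : List (List Char) → Nat → List (List Char)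
  | [], _ => []
  | w :: ws, j => w.map (pvBEnc aL (shift + (j : Int))) :: pvBWords aL shift ws (j + 1)

-- seperator.join(words)
def pvBJoin (sep : String) : List (List Char) → List Char
  | [] => []
  | [w] => w
  | w :: ws => w ++ sep.toList ++ pvBJoin sep ws

def encode_caeser_progressive_word_alt (pt : String) (a : String) (shift : Int) (increment : Int) (seperator : String) : String :=
  String.mk (pvBJoin seperator (pvBWords a.toList shift (pvBSplit seperator pt.toList) 0))

-- ===== PRECONDITION & SPEC =====
-- Pre_ excludes exactly the inputs on which Python A raises: empty pt (IndexError at pt[0]) and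
-- any character that is neither the separator nor in the alphabet (ValueError from a.index).
def Pre_encode_caeser_progressive_word (pt : String) (a : String) (shift : Int) (increment : Int) (seperator : String) : Prop :=
  (!pt.toList.isEmpty && pt.toList.all (fun c => seperator.toList == [c] || a.toList.contains c)) = true
instance (pt : String) (a : String) (shift : Int) (increment : Int) (seperator : String) : Decidable (Pre_encode_caeser_progressive_word pt a shift increment seperator) := by unfold Pre_encode_caeser_progressive_word; infer_instance

def pvWitness_encode_caeser_progressive_word : String × String × Int × Int × String := ("ab a", "ab", 3, 1, " ")

-- On empty pt, A raises IndexError (pt[0]); B returns "".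
def Raises_encode_caeser_progressive_word (pt : String) (a : String) (shift : Int) (increment : Int) (seperator : String) : Prop :=
  pt.toList = []
instance (pt : String) (a : String) (shift : Int) (increment : Int) (seperator : String) : Decidable (Raises_encode_caeser_progressive_word pt a shift increment seperator) := by unfold Raises_encode_caeser_progressive_word; infer_instance
def pvRaiseWitness_encode_caeser_progressive_word : String × String × Int × Int × String := ("", "ab", 3, 1, " ")
def pvRaiseWitnessOut_encode_caeser_progressive_word : String := ""

def Spec_encode_caeser_progressive_word (pt : String) (a : String) (shift : Int) (increment : Int) (seperator : String) (out : String) : Prop := out = encode_caeser_progressive_word_alt pt a shift increment seperator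
instance (pt : String) (a : String) (shift : Int) (increment : Int) (seperator : String) (out : String) : Decidable (Spec_encode_caeser_progressive_word pt a shift increment seperator out) := by unfold Spec_encode_caeser_progressive_word; infer_instance

-- ===== CLAIM (what is proved, stated in full; the proofs are below) =====
def Claim_equal_encode_caeser_progressive_word : Prop := ∀ (pt : String) (a : String) (shift : Int) (increment : Int) (seperator : String), Dom_encode_caeser_progressive_word pt a shift increment seperator → Pre_encode_caeser_progressive_word pt a shift increment seperator → Spec_encode_caeser_progressive_word pt a shift increment seperator (encode_caeser_progressive_word pt a shift increment seperator)

def Claim_raises_encode_caeser_progressive_word : Prop := (∀ (pt : String) (a : String) (shift : Int) (increment : Int) (seperator : String), Dom_encode_caeser_progressive_word pt a shift increment seperator → Raises_encode_caeser_progressive_word pt a shift increment seperator → ¬ Pre_encode_caeser_progressive_word pt a shift increment seperator) ∧ (Dom_encode_caeser_progressive_word (pvRaiseWitness_encode_caeser_progressive_word.1) (pvRaiseWitness_encode_caeser_progressive_word.2.1) (pvRaiseWitness_encode_caeser_progressive_word.2.2.1) (pvRaiseWitness_encode_caeser_progressive_word.2.2.2.1) (pvRaiseWitness_encode_caeser_progressive_word.2.2.2.2)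 ∧ Raises_encode_caeser_progressive_word (pvRaiseWitness_encode_caeser_progressive_word.1) (pvRaiseWitness_encode_caeser_progressive_word.2.1) (pvRaiseWitness_encode_caeser_progressive_word.2.2.1) (pvRaiseWitness_encode_caeser_progressive_word.2.2.2.1) (pvRaiseWitness_encode_caeser_progressive_word.2.2.2.2) ∧ encode_caeser_progressive_word_alt (pvRaiseWitness_encode_caeser_progressive_word.1) (pvRaiseWitness_encode_caeser_progressive_word.2.1) (pvRaiseWitness_encode_caeser_progressive_word.2.2.1) (pvRaiseWitness_encode_caeser_progressive_word.2.2.2.1) (pvRaiseWitness_encode_caeser_progressive_word.2.2.2.2) = pvRaiseWitnessOut_encode_caeser_progressive_word)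

-- ===== LEMMAS AND PROOFS =====

-- proof-side helper: the words encoded with successive shifts s, s+1, …
def pvBWordsFrom (aL : List Char) : Int → List (List Char) → List (List Char)
  | _, [] => []
  | s, w :: ws => w.map (pvBEnc aL s) :: pvBWordsFrom aL (s + 1) ws

theorem pvBWords_eq_from (aL : List Char) (shift : Int) :
    ∀ (ws : List (List Char)) (j : Nat), pvBWords aL shift ws j = pvBWordsFrom aL (shift + (j : Int)) ws := by
  intro ws
  induction ws with
  | nil => intro j; rfl
  | cons w ws ih =>
    intro j
    simp only [pvBWords, pvBWordsFrom, ih (j + 1)]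
    congr 2
    push_cast
    ring

theorem pvBSplit_ne_nil (sep : String) (l : List Char) : pvBSplit sep l ≠ [] := by
  induction l with
  | nil => simp [pvBSplit]
  | cons c rest ih =>
    simp only [pvBSplit]
    split
    · simp
    · cases h : pvBSplit sep rest <;> simp

theorem pvMain (aL : List Char) (sep : String) :
    ∀ (l : List Char) (s : Int),
      pvALoop aL sep l s = pvBJoin sep (pvBWordsFrom aL s (pvBSplit sep l)) := by
  intro l
  induction l with
  | nil => intro s; rfl
  | cons c rest ih =>
    intro s
    simp only [pvALoop, pvBSplit]
    by_cases h : String.mk [c] == sep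
    · simp only [h, if_true]
      rw [ih (s + 1)]
      cases hr : pvBSplit sep rest with
      | nil => exact absurd hr (pvBSplit_ne_nil sep rest)
      | cons w ws =>
        simp [pvBWordsFrom, pvBJoin]
    · simp only [h, if_false, Bool.false_eq_true]
      rw [ih s]
      cases hr : pvBSplit sep rest with
      | nil => exact absurd hr (pvBSplit_ne_nil sep rest)
      | cons w ws =>
        simp only [pvBWordsFrom]
        cases ws with
        | nil => simp [pvBJoin, pvBWordsFrom, pvAEnc, pvBEnc]
        | cons w2 ws2 => simp [pvBJoin, pvBWordsFrom, pvAEnc, pvBEnc]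

-- ===== VERDICT (by name: the statement is the Claim_ definition above) =====
theorem encode_caeser_progressive_word_spec : Claim_equal_encode_caeser_progressive_word := by
  intro pt a shift increment seperator _ _
  unfold Spec_encode_caeser_progressive_word encode_caeser_progressive_word encode_caeser_progressive_word_alt
  rw [pvBWords_eq_from]
  simp [pvMain]

@[simp] theorem encode_caeser_progressive_word_raises : Claim_raises_encode_caeser_progressive_word := by
  unfold Claim_raises_encode_caeser_progressive_word
  constructor
  · intro pt a shift increment seperator _ hr hpre
    unfold Pre_encode_caeser_progressive_word at hpre
    rw [hr] at hpre
    simp at hpre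
  · exact ⟨by decide, by decide, by decide⟩
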